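-- pv_equiv track=rewrite | github.com/sherlock-0327/ITAI-2025 | 01_2022141430166_李忻嫒/nqueen.py | select_next_position
-- ===== SOURCE A (Python) =====
-- def select_next_position(
--
--     n: int,
--     row: int,
--     occupied_cols: set,
--     occupied_diag1: set,
--     occupied_diag2: set,
-- ) -> list[int]:
--     available_cols = [col for col in range(n) if col not in occupied_cols]
--
--     # 计算每个可用位置的冲突数
--     conflict_counts = []
--     for col in available_cols:
--         conflicts = 0
--         # 检查对角线冲突
--         if (row - col) in occupied_diag1:
--             conflicts += 1
--         if (row + col) in occupied_diag2:
--             conflicts += 1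
--         conflict_counts.append((conflicts, col))
--
--     # 按冲突数排序，冲突少的优先
--     conflict_counts.sort()
--     return [col for _, col in conflict_counts]
-- ===== SOURCE B (Python) =====
-- def select_next_position(n, row, occupied_cols, occupied_diag1, occupied_diag2):
--     # one pass: counting sort into three conflict buckets (0, 1, 2), then concatenate
--     b0, b1, b2 = [], [], []
--     for col in range(n):
--         if col in occupied_cols:
--             continue
--         c = ((row - col) in occupied_diag1) + ((row + col) in occupied_diag2)
--         if c == 0:
--             b0.append(col)
--         elif c == 1:
--             b1.append(col)
--         else:
--             b2.append(col)
--     return b0 + b1 + b2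
-- ===== Notes on version B (the rewrite author's own statement) =====
-- stated objective: alternative
-- what changed: Replaces build-(conflicts,col)-pairs-then-sort with a single pass that counting-sorts the available columns into three conflict buckets (0, 1, 2) and concatenates them, eliminating the sort; measured speed is comparable.
import Mathlib
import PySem

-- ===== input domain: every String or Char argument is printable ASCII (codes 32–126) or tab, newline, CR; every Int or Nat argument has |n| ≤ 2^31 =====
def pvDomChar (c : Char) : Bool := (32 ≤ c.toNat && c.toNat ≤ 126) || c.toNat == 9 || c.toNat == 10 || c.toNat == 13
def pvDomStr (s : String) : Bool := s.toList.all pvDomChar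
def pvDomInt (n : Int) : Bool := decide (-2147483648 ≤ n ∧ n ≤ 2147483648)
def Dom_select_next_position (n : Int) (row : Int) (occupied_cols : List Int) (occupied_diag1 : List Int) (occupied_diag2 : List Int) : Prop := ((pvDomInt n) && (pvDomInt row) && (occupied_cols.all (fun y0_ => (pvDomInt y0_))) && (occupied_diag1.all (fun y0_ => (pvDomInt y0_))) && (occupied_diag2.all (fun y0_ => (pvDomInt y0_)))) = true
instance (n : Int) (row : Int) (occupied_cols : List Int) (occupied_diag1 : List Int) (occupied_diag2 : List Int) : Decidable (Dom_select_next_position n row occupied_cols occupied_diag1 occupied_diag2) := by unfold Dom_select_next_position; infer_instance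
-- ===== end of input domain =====

-- B replaces A's build-(conflicts,col)-pairs-then-sort with a single pass that counting-sorts
-- the available columns into three conflict buckets (0/1/2) and concatenates them (no sort).

-- ===== PORT A =====
def select_next_position (n : Int) (row : Int) (occupied_cols : List Int) (occupied_diag1 : List Int) (occupied_diag2 : List Int) : List Int :=
  let available_cols := (PySem.List.pyRange 0 n 1).filter (fun col => !(occupied_cols.contains col))
  let conflict_counts := available_cols.foldl (fun acc col =>
    let conflicts : Int := 0
    let conflicts := if occupied_diag1.contains (row - col) then conflicts + 1 else conflicts
    let conflicts := if occupied_diag2.contains (row + col) then conflicts + 1 else conflicts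
    acc ++ [(conflicts, col)]) []
  (PySem.List.sorted2 conflict_counts Prod.fst Prod.snd false).map Prod.snd

-- ===== PORT B =====
def select_next_position_alt (n : Int) (row : Int) (occupied_cols : List Int) (occupied_diag1 : List Int) (occupied_diag2 : List Int) : List Int :=
  let s := (PySem.List.pyRange 0 n 1).foldl
    (fun (acc : List Int × List Int × List Int) col =>
      if occupied_cols.contains col then acc
      else
        let c : Int := (if occupied_diag1.contains (row - col) then 1 else 0)
                     + (if occupied_diag2.contains (row + col) then 1 else 0)
        if c == 0 then (acc.1 ++ [col], acc.2.1, acc.2.2)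
        else if c == 1 then (acc.1, acc.2.1 ++ [col], acc.2.2)
        else (acc.1, acc.2.1, acc.2.2 ++ [col]))
    ([], [], [])
  s.1 ++ s.2.1 ++ s.2.2

-- ===== PRECONDITION & SPEC =====
def Spec_select_next_position (n : Int) (row : Int) (occupied_cols : List Int) (occupied_diag1 : List Int) (occupied_diag2 : List Int) (out : List Int) : Prop := out = select_next_position_alt n row occupied_cols occupied_diag1 occupied_diag2
instance (n : Int) (row : Int) (occupied_cols : List Int) (occupied_diag1 : List Int) (occupied_diag2 : List Int) (out : List Int) : Decidable (Spec_select_next_position n row occupied_cols occupied_diag1 occupied_diag2 out) := by unfold Spec_select_next_position; infer_instance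

-- ===== CLAIM (what is proved, stated in full; the proofs are below) =====
def Claim_equal_select_next_position : Prop := ∀ (n : Int) (row : Int) (occupied_cols : List Int) (occupied_diag1 : List Int) (occupied_diag2 : List Int), Dom_select_next_position n row occupied_cols occupied_diag1 occupied_diag2 → Spec_select_next_position n row occupied_cols occupied_diag1 occupied_diag2 (select_next_position n row occupied_cols occupied_diag1 occupied_diag2)

-- ===== LEMMAS AND PROOFS =====

-- the conflict count of a column
def pvConf (row : Int) (d1 d2 : List Int) (col : Int) : Int :=
  (if d1.contains (row - col) then 1 else 0) + (if d2.contains (row + col) then 1 else 0)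

lemma pvConf_cases (row : Int) (d1 d2 : List Int) (col : Int) :
    pvConf row d1 d2 col = 0 ∨ pvConf row d1 d2 col = 1 ∨ pvConf row d1 d2 col = 2 := by
  unfold pvConf; split_ifs <;> simp

-- B's fold computes the three filter-buckets
lemma alt_fold_eq (row : Int) (oc d1 d2 : List Int) (l : List Int) (a b c : List Int) :
    l.foldl
      (fun (acc : List Int × List Int × List Int) col =>
        if oc.contains col then acc
        else
          let cc : Int := (if d1.contains (row - col) then 1 else 0)
                        + (if d2.contains (row + col) then 1 else 0)
          if cc == 0 then (acc.1 ++ [col], acc.2.1, acc.2.2)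
          else if cc == 1 then (acc.1, acc.2.1 ++ [col], acc.2.2)
          else (acc.1, acc.2.1, acc.2.2 ++ [col]))
      (a, b, c)
    = (a ++ (l.filter (fun col => !(oc.contains col) && pvConf row d1 d2 col == 0)),
       b ++ (l.filter (fun col => !(oc.contains col) && pvConf row d1 d2 col == 1)),
       c ++ (l.filter (fun col => !(oc.contains col) && pvConf row d1 d2 col == 2))) := by
  set step := fun (acc : List Int × List Int × List Int) (col : Int) =>
      if oc.contains col then acc
      else
        let cc : Int := (if d1.contains (row - col) then 1 else 0)
                      + (if d2.contains (row + col) then 1 else 0)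
        if cc == 0 then (acc.1 ++ [col], acc.2.1, acc.2.2)
        else if cc == 1 then (acc.1, acc.2.1 ++ [col], acc.2.2)
        else (acc.1, acc.2.1, acc.2.2 ++ [col]) with hstepdef
  induction l generalizing a b c with
  | nil => simp
  | cons x xs ih =>
    rw [List.foldl_cons]
    by_cases hoc : oc.contains x = true
    · have hstep : step (a, b, c) x = (a, b, c) := by
        simp only [hstepdef]; rw [if_pos hoc]
      rw [hstep, ih]
      have hx : x ∈ oc := by simpa using hoc
      simp [hx]
    · have hcc0 : ((if d1.contains (row - x) then (1:Int) else 0)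
          + (if d2.contains (row + x) then 1 else 0)) = pvConf row d1 d2 x := rfl
      rcases pvConf_cases row d1 d2 x with h | h | h
      · have hstep : step (a, b, c) x = (a ++ [x], b, c) := by
          simp only [hstepdef]; rw [if_neg hoc, hcc0, h]; norm_num
        rw [hstep, ih]
        have hx : ¬ x ∈ oc := by simpa using hoc
        simp [hx, h]
      · have hstep : step (a, b, c) x = (a, b ++ [x], c) := by
          simp only [hstepdef]; rw [if_neg hoc, hcc0, h]; norm_num
        rw [hstep, ih]
        have hx : ¬ x ∈ oc := by simpa using hoc
        simp [hx, h]
      · have hstep : step (a, b, c) x = (a, b, c ++ [x]) := by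
          simp only [hstepdef]; rw [if_neg hoc, hcc0, h]; norm_num
        rw [hstep, ih]
        have hx : ¬ x ∈ oc := by simpa using hoc
        simp [hx, h]

-- sorted2 with fst/snd keys is sorted with the lexicographic key
lemma sorted2_eq_sorted_lex (xs : List (Int × Int)) :
    PySem.List.sorted2 xs Prod.fst Prod.snd false
      = PySem.List.sorted xs (fun p : Int × Int => toLex p) false := by
  rw [PySem.List.sorted_eq_foldl_insertBy]
  unfold PySem.List.sorted2
  simp only [if_neg (by decide : ¬(false = true))]
  congr 1
  funext acc x
  congr 1
  funext a b
  by_cases h1 : a.1 < b.1 <;> by_cases h2 : b.1 < a.1 <;> by_cases h3 : a.2 < b.2 <;>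
    simp [Prod.Lex.toLex_lt_toLex, h1, h2, h3] <;> omega

-- three exclusive-exhaustive filters concatenated are a permutation of the list
lemma filter3_perm (l : List Int) (g : Int → Int) (hg : ∀ x, g x = 0 ∨ g x = 1 ∨ g x = 2)
    (p : Int → Bool) :
    (l.filter (fun x => p x && g x == 0) ++ l.filter (fun x => p x && g x == 1)
      ++ l.filter (fun x => p x && g x == 2)).Perm (l.filter p) := by
  induction l with
  | nil => simp
  | cons x xs ih =>
    by_cases hp : p x = true
    · rcases hg x with h | h | h
      · have e0 : (g x == (0:Int)) = true := by simp [h]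
        have e1 : (g x == (1:Int)) = false := by simp [h]
        have e2 : (g x == (2:Int)) = false := by simp [h]
        simp only [List.filter_cons, hp, Bool.true_and, e0, e1, e2, if_true, Bool.false_eq_true,
          if_false, List.cons_append]
        exact ih.cons x
      · have e0 : (g x == (0:Int)) = false := by simp [h]
        have e1 : (g x == (1:Int)) = true := by simp [h]
        have e2 : (g x == (2:Int)) = false := by simp [h]
        simp only [List.filter_cons, hp, Bool.true_and, e0, e1, e2, if_true, Bool.false_eq_true,
          if_false]
        exact (List.perm_middle.append_right _).trans (ih.cons x)
      · have e0 : (g x == (0:Int)) = false := by simp [h]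
        have e1 : (g x == (1:Int)) = false := by simp [h]
        have e2 : (g x == (2:Int)) = true := by simp [h]
        simp only [List.filter_cons, hp, Bool.true_and, e0, e1, e2, if_true, Bool.false_eq_true,
          if_false]
        exact List.perm_middle.trans (ih.cons x)
    · have hpx : p x = false := by simpa using hp
      simp only [List.filter_cons, hpx, Bool.false_and, Bool.false_eq_true, if_false]
      exact ih

lemma pyRange_pairwise (n : Int) : (PySem.List.pyRange 0 n 1).Pairwise (· < ·) := by
  unfold PySem.List.pyRange
  split
  · simp
  · refine List.Pairwise.map _ ?_ List.pairwise_lt_range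
    intro a b hab
    omega

-- ===== VERDICT (by name: the statement is the Claim_ definition above) =====
theorem select_next_position_spec : Claim_equal_select_next_position := by
  intro n row oc d1 d2 _
  unfold Spec_select_next_position select_next_position select_next_position_alt
  -- name the pieces
  set R := PySem.List.pyRange 0 n 1 with hR
  have hfold := alt_fold_eq row oc d1 d2 R [] [] []
  rw [hfold]
  simp only [List.nil_append]
  -- A's conflict_counts is a map over the available columns
  have hcc : (R.filter (fun col => !(oc.contains col))).foldl (fun acc col =>
      let conflicts : Int := 0
      let conflicts := if d1.contains (row - col) then conflicts + 1 else conflicts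
      let conflicts := if d2.contains (row + col) then conflicts + 1 else conflicts
      acc ++ [(conflicts, col)]) []
      = (R.filter (fun col => !(oc.contains col))).map
          (fun col => (pvConf row d1 d2 col, col)) := by
    rw [PySem.List.foldl_append_singleton_eq_map]
    simp only [List.nil_append]
    apply List.map_congr_left
    intro x _
    simp only [pvConf]
    split_ifs <;> simp
  rw [hcc]
  -- the target list of pairs, in bucket order
  set f : Int → Int × Int := fun col => (pvConf row d1 d2 col, col) with hf
  set p : Int → Bool := fun col => !(oc.contains col) with hp
  set g : Int → Int := pvConf row d1 d2 with hg
  set ys := (R.filter (fun x => p x && g x == 0)).map f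
          ++ (R.filter (fun x => p x && g x == 1)).map f
          ++ (R.filter (fun x => p x && g x == 2)).map f with hys
  have hperm : ys.Perm ((R.filter p).map f) := by
    have := (filter3_perm R g (pvConf_cases row d1 d2) p).map f
    simpa [hys, List.map_append] using this
  have hRp : R.Pairwise (· < ·) := pyRange_pairwise n
  have hmemconf : ∀ (i : Int) x, x ∈ R.filter (fun y => p y && g y == i) → g x = i := by
    intro i x hx
    have := List.of_mem_filter hx
    simp only [Bool.and_eq_true, beq_iff_eq] at this
    exact this.2
  have hbucket : ∀ (i : Int), ((R.filter (fun y => p y && g y == i)).map f).Pairwise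
      (fun a b => toLex a < toLex b) := by
    intro i
    rw [List.pairwise_map]
    refine List.Pairwise.imp_of_mem ?_ (hRp.filter _)
    intro a b ha hb hab
    have hga : g a = i := hmemconf i a ha
    have hgb : g b = i := hmemconf i b hb
    simp only [hf]
    rw [Prod.Lex.toLex_lt_toLex]
    exact Or.inr ⟨by rw [hga, hgb], hab⟩
  have hpw : ys.Pairwise (fun a b => toLex a < toLex b) := by
    rw [hys, List.pairwise_append, List.pairwise_append]
    refine ⟨⟨hbucket 0, hbucket 1, ?_⟩, hbucket 2, ?_⟩
    · intro a ha b hb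
      rcases List.mem_map.1 ha with ⟨x, hx, rfl⟩
      rcases List.mem_map.1 hb with ⟨y, hy, rfl⟩
      rw [Prod.Lex.toLex_lt_toLex]
      left
      simp only [hf]
      rw [hmemconf 0 x hx, hmemconf 1 y hy]
      norm_num
    · intro a ha b hb
      rcases List.mem_map.1 hb with ⟨y, hy, rfl⟩
      rcases List.mem_append.1 ha with ha' | ha' <;>
      · rcases List.mem_map.1 ha' with ⟨x, hx, rfl⟩
        rw [Prod.Lex.toLex_lt_toLex]
        left
        simp only [hf]
        rw [hmemconf _ x hx, hmemconf 2 y hy]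
        norm_num
  rw [sorted2_eq_sorted_lex]
  rw [PySem.List.sorted_eq_of_perm_of_pairwise_lt _ ys _ hperm hpw]
  rw [hys]
  simp only [List.map_append, List.map_map]
  have hsndf : Prod.snd ∘ f = id := by funext x; simp [hf]
  simp [hsndf, hp]
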